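-- pv_equiv track=rewrite | github.com/Uks130322/yandex_algs_5.0 | algs_5_3/task_F/task_F.py | change_words
-- ===== SOURCE A (Python) =====
-- def change_words(dictionary: set[str], words: list[str]) -> str:
--     result = ''
--     for word in words:
--         for i in range(len(word)):
--             if word[:i] in dictionary:
--                 result += word[:i] + " "
--                 break
--         else:
--             result += word + " "
--     return result[:-1]
-- ===== SOURCE B (Python) =====
-- def change_words(dictionary, words):
--     # Build a trie of the dictionary once, then walk each word to its
--     # shortest end-of-word prefix (strictly shorter than the word).
--     root = {}
--     for w in dictionary:
--         node = root
--         for c in w: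
--             node = node.setdefault(c, {})
--         node[None] = True
--     pieces = []
--     for word in words:
--         rep = word
--         node = root
--         for i, c in enumerate(word):
--             if None in node:
--                 rep = word[:i]
--                 break
--             node = node.get(c)
--             if node is None:
--                 break
--         pieces.append(rep)
--     return ' '.join(pieces)
-- ===== Notes on version B (the rewrite author's own statement) =====
-- stated objective: alternative
-- what changed: Instead of testing every prefix of each word against the dictionary set, B builds a trie of the dictionary once and walks each word once to its shortest end-of-word prefix.
import Mathlib
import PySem

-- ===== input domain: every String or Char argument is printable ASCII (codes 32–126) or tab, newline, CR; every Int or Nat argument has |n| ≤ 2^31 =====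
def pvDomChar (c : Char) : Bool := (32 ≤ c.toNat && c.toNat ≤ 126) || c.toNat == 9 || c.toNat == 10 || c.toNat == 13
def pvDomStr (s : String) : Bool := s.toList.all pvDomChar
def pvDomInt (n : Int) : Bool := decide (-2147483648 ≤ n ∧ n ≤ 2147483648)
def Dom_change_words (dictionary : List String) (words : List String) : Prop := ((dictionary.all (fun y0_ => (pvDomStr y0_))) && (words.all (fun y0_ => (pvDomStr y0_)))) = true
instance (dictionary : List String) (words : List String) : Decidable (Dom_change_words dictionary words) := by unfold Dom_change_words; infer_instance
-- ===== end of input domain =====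

-- B builds one trie of the dictionary and walks each word once to its shortest end-of-word
-- prefix, instead of A's per-word scan over every prefix with a set lookup each.

-- ===== PORT A =====
-- A's inner loop: 'for i in range(len(word)): if word[:i] in dictionary: <piece = word[:i]>; break
-- else: <piece = word>'; returns the piece appended to result for one word
def pickA (dictionary : List (List Char)) (word : List Char) : List Int → List Char
  | [] => word
  | i :: rest =>
      if PySem.List.slice word none (some i) ∈ dictionary
      then PySem.List.slice word none (some i)
      else pickA dictionary word rest

def change_words (dictionary : List String) (words : List String) : String :=
  let dict := dictionary.map String.toList
  let result := words.foldl
    (fun result word =>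
      result ++ pickA dict word.toList
        (PySem.List.pyRange 0 (word.toList.length : Int) 1) ++ [' '])
    ([] : List Char)
  String.ofList (PySem.List.slice result none (some (-1)))

-- ===== PORT B =====
-- Source B's trie is a dict of dicts with an end-of-word marker; here a child dict is the
-- assoc chain 'BT' (char, end-of-word flag, child chain, next sibling) and a node is
-- the pair (end-of-word flag, child chain)
inductive BT : Type
  | nil : BT
  | node : Char → Bool → BT → BT → BT

-- node.get(c)
def getC : BT → Char → Option (Bool × BT)
  | .nil, _ => none
  | .node c0 b0 ch0 sib, c => if c = c0 then some (b0, ch0) else getC sib c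

-- write back the updated child for c (replace, or append if absent)
def setC : BT → Char → (Bool × BT) → BT
  | .nil, c, p => .node c p.1 p.2 .nil
  | .node c0 b0 ch0 sib, c, p =>
      if c = c0 then .node c0 p.1 p.2 sib else .node c0 b0 ch0 (setC sib c p)

-- 'node = node.setdefault(c, {})' down the word, then 'node[None] = True'
def trieInsert : List Char → Bool × BT → Bool × BT
  | [], (_, ch) => (true, ch)
  | c :: cs, (b, ch) => (b, setC ch c (trieInsert cs ((getC ch c).getD (false, .nil))))

-- Source B's 'for i, c in enumerate(word)' walk: 'some i' = shortest end-of-word depth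
-- i < len(word); 'none' = the walk broke off or exhausted the word
def walkB : Bool × BT → List Char → Nat → Option Nat
  | (b, ch), c :: cs, i =>
      if b then some i
      else match getC ch c with
        | none => none
        | some p => walkB p cs (i + 1)
  | _, [], _ => none

def pickB (root : Bool × BT) (word : List Char) : List Char :=
  match walkB root word 0 with
  | some i => word.take i
  | none => word

def change_words_alt (dictionary : List String) (words : List String) : String :=
  let root := (dictionary.map String.toList).foldl (fun acc w => trieInsert w acc) (false, .nil)
  String.ofList (PySem.Chars.join [' '] (words.map (fun w => pickB root w.toList)))

-- ===== PRECONDITION & SPEC =====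
def Spec_change_words (dictionary : List String) (words : List String) (out : String) : Prop := out = change_words_alt dictionary words
instance (dictionary : List String) (words : List String) (out : String) : Decidable (Spec_change_words dictionary words out) := by unfold Spec_change_words; infer_instance

-- ===== CLAIM (what is proved, stated in full; the proofs are below) =====
def Claim_equal_change_words : Prop := ∀ (dictionary : List String) (words : List String), Dom_change_words dictionary words → Spec_change_words dictionary words (change_words dictionary words)

-- ===== LEMMAS AND PROOFS =====

-- proof-only: membership of a word in the trie
def foundB : Bool × BT → List Char → Bool
  | (b, _), [] => b
  | (_, ch), c :: cs =>
      match getC ch c with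
      | none => false
      | some p => foundB p cs

theorem getC_setC (ch : BT) (c c' : Char) (p : Bool × BT) :
    getC (setC ch c p) c' = if c' = c then some p else getC ch c' := by
  induction ch with
  | nil => simp [setC, getC]
  | node c0 b0 ch0 sib ih1 ih2 =>
      simp only [setC]
      by_cases h : c = c0
      · subst h
        rw [if_pos rfl]
        by_cases h' : c' = c <;> simp [getC, h']
      · simp only [if_neg h, getC, ih2]
        by_cases h' : c' = c0
        · subst h'; simp [Ne.symm h]
        · simp [h']

theorem foundB_empty (s : List Char) : foundB (false, .nil) s = false := by
  cases s <;> simp [foundB, getC]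

theorem foundB_insert (w : List Char) (t : Bool × BT) (s : List Char) :
    foundB (trieInsert w t) s = (s == w || foundB t s) := by
  induction w generalizing t s with
  | nil =>
      obtain ⟨b, ch⟩ := t
      cases s with
      | nil => simp [trieInsert, foundB]
      | cons c cs => simp [trieInsert, foundB]
  | cons c cs ih =>
      obtain ⟨b, ch⟩ := t
      cases s with
      | nil => simp [trieInsert, foundB]
      | cons c' cs' =>
          simp only [trieInsert, foundB, getC_setC]
          by_cases h : c' = c
          · subst h
            rw [if_pos rfl]
            cases hg : getC ch c' with
            | none => simp [ih, foundB_empty, List.cons_beq_cons]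
            | some u => simp [ih, List.cons_beq_cons]
          · have hb : ((c' :: cs') == (c :: cs)) = false := by
              simp [List.cons_beq_cons, h]
            simp [if_neg h, hb]

theorem walkB_eq_find (cs : List Char) (t : Bool × BT) (i : Nat) :
    walkB t cs i =
      (List.find? (fun j => foundB t (cs.take j)) (List.range cs.length)).map (· + i) := by
  induction cs generalizing t i with
  | nil => obtain ⟨b, ch⟩ := t; simp [walkB]
  | cons c cs ih =>
      obtain ⟨b, ch⟩ := t
      rw [List.length_cons, List.range_succ_eq_map, List.find?_cons]
      simp only [List.take_zero]
      by_cases hb : b = true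
      · subst hb
        simp [walkB, foundB]
      · have hb' : b = false := by simpa using hb
        subst hb'
        simp only [walkB, foundB, Bool.false_eq_true, if_false]
        rw [List.find?_map]
        cases hg : getC ch c with
        | none =>
            have hnone : List.find? ((fun j => foundB (false, ch) ((c :: cs).take j)) ∘ Nat.succ)
                (List.range cs.length) = none := by
              rw [List.find?_eq_none]
              intro j _
              simp [Function.comp, foundB, hg]
            rw [hnone]
            rfl
        | some p =>
            have hcomp : ((fun j => foundB (false, ch) ((c :: cs).take j)) ∘ Nat.succ)
                = fun j => foundB p (cs.take j) := by
              funext j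
              simp [Function.comp, foundB, hg]
            rw [hcomp]
            show walkB p cs (i + 1) = _
            rw [ih, Option.map_map]
            congr 1
            funext j
            simp only [Function.comp, Nat.succ_eq_add_one]
            omega

theorem foundB_foldl (ds : List (List Char)) (t : Bool × BT) (s : List Char) :
    foundB (ds.foldl (fun acc w => trieInsert w acc) t) s = (foundB t s || decide (s ∈ ds)) := by
  induction ds generalizing t with
  | nil => simp
  | cons d ds ih =>
      rw [List.foldl_cons, ih, foundB_insert]
      by_cases hsd : s = d
      · subst hsd; simp
      · have hf : (s == d) = false := by simp [hsd]
        simp [hf, hsd]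

theorem pickA_eq_find (dict : List (List Char)) (word : List Char) (js : List Nat) :
    pickA dict word (js.map (fun (j : Nat) => (j : Int))) =
      match List.find? (fun j => decide (word.take j ∈ dict)) js with
      | some j => word.take j
      | none => word := by
  induction js with
  | nil => simp [pickA]
  | cons j js ih =>
      rw [List.map_cons, List.find?_cons]
      simp only [pickA, PySem.List.slice_to_natCast]
      by_cases h : word.take j ∈ dict
      · simp [h]
      · simp [h, ih]

theorem pick_eq (dict : List (List Char)) (word : List Char) :
    pickA dict word (PySem.List.pyRange 0 (word.length : Int) 1) =
      pickB (dict.foldl (fun acc w => trieInsert w acc) (false, .nil)) word := by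
  rw [show PySem.List.pyRange 0 (word.length : Int) 1 = PySem.List.pyRange 0 (word.length : Int) from rfl]
  rw [PySem.List.pyRange_zero_natCast, pickA_eq_find]
  unfold pickB
  rw [walkB_eq_find]
  have hp : (fun j => foundB (dict.foldl (fun acc w => trieInsert w acc) (false, .nil)) (word.take j))
      = fun j => decide (word.take j ∈ dict) := by
    funext j
    rw [foundB_foldl, foundB_empty]
    simp
  rw [hp]
  cases List.find? (fun j => decide (word.take j ∈ dict)) (List.range word.length) <;> simp

theorem join_dropLast (ps : List (List Char)) :
    (ps.flatMap (fun p => p ++ [' '])).dropLast = PySem.Chars.join [' '] ps := by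
  induction ps with
  | nil => simp [PySem.Chars.join_nil]
  | cons p rest ih =>
      cases rest with
      | nil => simp [PySem.Chars.join_singleton]
      | cons q rest' =>
          rw [PySem.Chars.join_cons_cons, ← ih]
          rw [List.flatMap_cons]
          rw [List.dropLast_append_of_ne_nil (by simp [List.flatMap_cons])]

theorem fold_join (ps : List (List Char)) :
    PySem.List.slice (ps.foldl (fun r p => r ++ p ++ [' ']) []) none (some (-1)) =
      PySem.Chars.join [' '] ps := by
  have hb : (ps.foldl (fun r p => r ++ p ++ [' ']) ([] : List Char))
      = ps.flatMap (fun p => p ++ [' ']) := by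
    have := PySem.List.foldl_append_eq_flatMap (fun p => p ++ [' ']) ps ([] : List Char)
    simpa [List.append_assoc] using this
  rw [hb, PySem.List.slice_to_neg_one, join_dropLast]

-- ===== VERDICT (by name: the statement is the Claim_ definition above) =====
theorem change_words_spec : Claim_equal_change_words := by
  intro dictionary words _
  unfold Spec_change_words
  dsimp only [change_words, change_words_alt]
  have hbody : (fun (result : List Char) (word : String) =>
        result ++ pickA (dictionary.map String.toList) word.toList
          (PySem.List.pyRange 0 (word.toList.length : Int) 1) ++ [' '])
      = fun result word =>
        result ++ pickB ((dictionary.map String.toList).foldl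
          (fun acc w => trieInsert w acc) (false, .nil)) word.toList ++ [' '] := by
    funext result word
    rw [pick_eq]
  rw [hbody]
  rw [← List.foldl_map (f := fun (w : String) =>
        pickB ((dictionary.map String.toList).foldl (fun acc w => trieInsert w acc) (false, .nil)) w.toList)
      (g := fun (r p : List Char) => r ++ p ++ [' '])]
  rw [fold_join]
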